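-- pv_equiv track=rewrite | github.com/RememberIOm/Advent_of_Code | 2023/day_13/part_1.py | get_reflex
-- ===== SOURCE A (Python) =====
-- def get_reflex(pattern):
--     max_reflex, max_row = 0, 0
--
--     for start_row in range(1, len(pattern)):
--         for delta in range(min(start_row, len(pattern) - start_row)):
--             if pattern[start_row - delta - 1] != pattern[start_row + delta]:
--                 break
--
--             if delta > max_reflex:
--                 max_reflex = delta
--                 max_row = start_row - 1
--
--     # 인덱스를 1부터 계산
--     max_row += 1
--
--     return max_reflex, max_row
-- ===== SOURCE B (Python) =====
-- def get_reflex(pattern):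
--     # Intern rows: equal rows get equal small ids, so comparisons are O(1) ints.
--     ids = {}
--     enc = [ids.setdefault(row, len(ids)) for row in pattern]
--     n = len(enc)
--     # Breadth-first over mirror depth: alive holds the mirror lines that still
--     # reflect perfectly down to the current depth d; deepen until none survive,
--     # recording the deepest matched offset and the first line achieving it.
--     best_delta, best_row = 0, 1
--     alive = list(range(1, n))
--     d = 0
--     while alive:
--         alive = [r for r in alive if d < min(r, n - r) and enc[r - 1 - d] == enc[r + d]]
--         if alive and d > best_delta:
--             best_delta, best_row = d, alive[0]
--         d += 1
--     return best_delta, best_row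
-- ===== Notes on version B (the rewrite author's own statement) =====
-- stated objective: alternative
-- what changed: A expands depth-first around each mirror line, comparing raw strings and tracking a running best inside the nested loop; B interns rows to small ints, then sweeps breadth-first over the reflection depth, keeping a shrinking set of still-alive mirror lines and recording the deepest depth with its first surviving line.
import Mathlib
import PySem

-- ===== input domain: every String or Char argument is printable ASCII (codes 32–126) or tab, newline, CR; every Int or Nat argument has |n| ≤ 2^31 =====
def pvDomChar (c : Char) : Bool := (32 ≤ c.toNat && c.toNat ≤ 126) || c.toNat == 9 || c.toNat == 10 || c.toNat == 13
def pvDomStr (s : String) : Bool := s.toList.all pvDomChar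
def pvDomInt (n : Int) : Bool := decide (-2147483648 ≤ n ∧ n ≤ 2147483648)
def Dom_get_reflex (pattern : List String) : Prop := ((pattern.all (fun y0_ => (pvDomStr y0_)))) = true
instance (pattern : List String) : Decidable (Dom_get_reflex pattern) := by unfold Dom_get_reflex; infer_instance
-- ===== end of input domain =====

-- B replaces A's depth-first expansion around each mirror line by row interning followed
-- by a breadth-first sweep over reflection depth with a shrinking set of alive mirror
-- lines; equal return values proved (objective: alternative).

-- ===== PORT A =====
-- inner loop: for delta in range(...): break on mismatch, update (max_reflex, max_row)
def aInner (pattern : List String) (start_row : Int) : List Int → (Int × Int) → (Int × Int)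
  | [], st => st
  | delta :: rest, st =>
    if PySem.List.pyGetD pattern (start_row - delta - 1) "" ≠ PySem.List.pyGetD pattern (start_row + delta) "" then
      st
    else
      aInner pattern start_row rest (if delta > st.1 then (delta, start_row - 1) else st)

def get_reflex (pattern : List String) : Int × Int :=
  let n : Int := pattern.length
  let st := (PySem.List.pyRange 1 n 1).foldl
    (fun st start_row =>
      aInner pattern start_row (PySem.List.pyRange 0 (min start_row (n - start_row)) 1) st)
    (0, 0)
  (st.1, st.2 + 1)

-- ===== PORT B =====
-- enc = [ids.setdefault(row, len(ids)) for row in pattern]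
def bEncode : List String → PySem.Dict String Int → List Int → List Int
  | [], _, acc => acc.reverse
  | row :: rest, ids, acc =>
    match ids.get? row with
    | some v => bEncode rest ids (v :: acc)
    | none => bEncode rest (ids.insert row (ids.size : Int)) ((ids.size : Int) :: acc)

-- while alive: alive = [r for r in alive if d < min(r, n-r) and enc[r-1-d] == enc[r+d]];
--              if alive and d > best_delta: best = (d, alive[0]); d += 1
def bKeep (enc : List Int) (n : Nat) (d : Int) (alive : List Int) : List Int :=
  alive.filter (fun r =>
    decide (d < min r ((n : Int) - r)) &&
      (PySem.List.pyGetD enc (r - 1 - d) 0 == PySem.List.pyGetD enc (r + d) 0))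

def bLoop (enc : List Int) (n : Nat) (alive : List Int) (d : Int) (best : Int × Int) : Int × Int :=
  if alive = [] then best
  else
    let keep := bKeep enc n d alive
    bLoop enc n keep (d + 1) (if keep ≠ [] ∧ d > best.1 then (d, keep.headD 0) else best)
termination_by alive.length + ((n : Int) - d).toNat
decreasing_by
  have hle : (bKeep enc n d alive).length ≤ alive.length := List.length_filter_le _ alive
  have hal : alive.length ≠ 0 := by
    intro h0; exact ‹¬alive = []› (List.eq_nil_of_length_eq_zero h0)
  by_cases hd : d < (n : Int)
  · omega
  · have hk : bKeep enc n d alive = [] := by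
      apply List.filter_eq_nil_iff.2
      intro r _
      simp only [Bool.and_eq_true, decide_eq_true_eq, not_and]
      intro hmin
      exfalso
      have h1 : d < r := lt_of_lt_of_le hmin (min_le_left _ _)
      have h2 : d < (n : Int) - r := lt_of_lt_of_le hmin (min_le_right _ _)
      have h3 : (0 : Int) ≤ (n : Int) := Int.natCast_nonneg n
      omega
    rw [hk]
    simp only [List.length_nil]
    omega

def get_reflex_alt (pattern : List String) : Int × Int :=
  let enc := bEncode pattern PySem.Dict.empty []
  let n := enc.length
  bLoop enc n (PySem.List.pyRange 1 (n : Int) 1) 0 (0, 1)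

-- ===== PRECONDITION & SPEC =====
def Spec_get_reflex (pattern : List String) (out : Int × Int) : Prop := out = get_reflex_alt pattern
instance (pattern : List String) (out : Int × Int) : Decidable (Spec_get_reflex pattern out) := by unfold Spec_get_reflex; infer_instance

-- ===== CLAIM (what is proved, stated in full; the proofs are below) =====
def Claim_equal_get_reflex : Prop := ∀ (pattern : List String), Dom_get_reflex pattern → Spec_get_reflex pattern (get_reflex pattern)

-- ===== LEMMAS AND PROOFS =====

-- ---- proof-side definitions ----

-- reflection extent at mirror line r, measured on the strings themselves
def extS (p : List String) (lim r k : Int) : Int :=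
  if h : k < lim ∧ p.getD (r - 1 - k).toNat "" = p.getD (r + k).toNat "" then
    extS p lim r (k + 1)
  else k
termination_by (lim - k).toNat
decreasing_by omega

def extf (p : List String) (r : Int) : Int := extS p (min r ((p.length : Int) - r)) r 0

-- net effect of A's outer loop, as a fold over the list of extents
def agg : Int × Int → Int → List Int → Int × Int
  | st, _, [] => st
  | st, r, k :: t => agg (if k - 1 > st.1 then (k - 1, r - 1) else st) (r + 1) t

-- B's encoding with the accumulator factored out
def encOf : List String → PySem.Dict String Int → List Int
  | [], _ => []
  | row :: rest, ids =>
    match ids.get? row with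
    | some v => v :: encOf rest ids
    | none => (ids.size : Int) :: encOf rest (ids.insert row (ids.size : Int))

-- invariant of the id dictionary: values are fresh consecutive ids, hence injective
def GoodD (ids : PySem.Dict String Int) : Prop :=
  (∀ s v, ids.get? s = some v → 0 ≤ v ∧ v < (ids.size : Int)) ∧
  (∀ s t v, ids.get? s = some v → ids.get? t = some v → s = t)

-- the common list of per-mirror-line extents, and B's alive set at depth d
def ksOf (p : List String) : List Int :=
  (PySem.List.pyRange 1 (p.length : Int) 1).map (extf p)

def aliveSpec (p : List String) (d : Int) : List Int :=
  (PySem.List.pyRange 1 (p.length : Int) 1).filter (fun r => decide (d ≤ extf p r))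

-- ---- encoding lemmas ----

theorem bEncode_eq (rest : List String) : ∀ (ids : PySem.Dict String Int) (acc : List Int),
    bEncode rest ids acc = acc.reverse ++ encOf rest ids := by
  induction rest with
  | nil => intro ids acc; simp [bEncode, encOf]
  | cons row rest ih =>
    intro ids acc
    simp only [bEncode, encOf]
    cases h : ids.get? row with
    | some v => simp [ih]
    | none => simp [ih]

theorem encOf_length (rest : List String) : ∀ ids, (encOf rest ids).length = rest.length := by
  induction rest with
  | nil => intro ids; simp [encOf]
  | cons row rest ih =>
    intro ids
    simp only [encOf]
    cases h : ids.get? row with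
    | some v => simp [ih]
    | none => simp [ih]

theorem GoodD_empty : GoodD PySem.Dict.empty := by
  constructor <;> intro s <;> simp [PySem.Dict.get?_empty]

theorem GoodD_insert (ids : PySem.Dict String Int) (row : String) (h : GoodD ids)
    (hn : ids.get? row = none) : GoodD (ids.insert row (ids.size : Int)) := by
  have hc : ids.contains row = false := (PySem.Dict.get?_eq_none_iff_contains ids row).1 hn
  have hsz : (ids.insert row (ids.size : Int)).size = ids.size + 1 := by
    rw [PySem.Dict.size_insert]; simp [hc]
  constructor
  · intro s v hv
    rw [PySem.Dict.get?_insert] at hv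
    by_cases hs : s = row
    · simp [hs] at hv; omega
    · simp [hs] at hv
      have := h.1 s v hv
      omega
  · intro s t v hs ht
    rw [PySem.Dict.get?_insert] at hs ht
    by_cases h1 : s = row <;> by_cases h2 : t = row
    · rw [h1, h2]
    · simp [h1, h2] at hs ht
      have := h.1 t v ht
      omega
    · simp [h1, h2] at hs ht
      have := h.1 s v hs
      omega
    · simp [h1, h2] at hs ht
      exact h.2 s t v hs ht

theorem enc_lookup (rest : List String) : ∀ (ids : PySem.Dict String Int), GoodD ids →
    ∀ (s : String) (v : Int), ids.get? s = some v →
    ∀ (i : Nat), i < rest.length →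
      ((encOf rest ids).getD i 0 = v ↔ rest.getD i "" = s) := by
  induction rest with
  | nil => intro ids _ s v _ i hi; simp at hi
  | cons row rest ih =>
    intro ids hg s v hv i hi
    simp only [encOf]
    cases h : ids.get? row with
    | some w =>
      cases i with
      | zero =>
        simp only [List.getD_cons_zero]
        constructor
        · intro hwv; exact hg.2 row s v (hwv ▸ h) hv
        · intro hrs; rw [hrs] at h; rw [h] at hv; exact Option.some_inj.1 hv
      | succ i =>
        simp only [List.getD_cons_succ]
        exact ih ids hg s v hv i (by simpa using hi)
    | none =>
      cases i with
      | zero =>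
        simp only [List.getD_cons_zero]
        have hb := hg.1 s v hv
        constructor
        · intro hsz; omega
        · intro hrs; rw [hrs] at h; rw [h] at hv; exact absurd hv (by simp)
      | succ i =>
        simp only [List.getD_cons_succ]
        have hg' := GoodD_insert ids row hg h
        have hs' : (ids.insert row (ids.size : Int)).get? s = some v := by
          rw [PySem.Dict.get?_insert]
          have hne : s ≠ row := by intro he; rw [he] at hv; rw [h] at hv; exact absurd hv (by simp)
          simp [hne, hv]
        exact ih _ hg' s v hs' i (by simpa using hi)

theorem enc_iff (rest : List String) : ∀ (ids : PySem.Dict String Int), GoodD ids →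
    ∀ (i j : Nat), i < rest.length → j < rest.length →
      ((encOf rest ids).getD i 0 = (encOf rest ids).getD j 0 ↔
        rest.getD i "" = rest.getD j "") := by
  induction rest with
  | nil => intro ids _ i j hi _; simp at hi
  | cons row rest ih =>
    intro ids hg i j hi hj
    have key : ∀ (m : Nat), m < rest.length →
        ((encOf (row :: rest) ids).getD (m + 1) 0 = (encOf (row :: rest) ids).getD 0 0 ↔
          rest.getD m "" = row) := by
      intro m hm
      simp only [encOf]
      cases h : ids.get? row with
      | some w =>
        simp only [List.getD_cons_succ, List.getD_cons_zero]
        exact enc_lookup rest ids hg row w h m hm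
      | none =>
        simp only [List.getD_cons_succ, List.getD_cons_zero]
        have hg' := GoodD_insert ids row hg h
        have hr' : (ids.insert row (ids.size : Int)).get? row = some (ids.size : Int) :=
          PySem.Dict.get?_insert_self ids row _
        exact enc_lookup rest _ hg' row _ hr' m hm
    cases i with
    | zero =>
      cases j with
      | zero => simp
      | succ j =>
        have hj' : j < rest.length := by simpa using hj
        have := key j hj'
        simp only [List.getD_cons_succ, List.getD_cons_zero] at this ⊢
        rw [eq_comm, this, eq_comm]
    | succ i =>
      have hi' : i < rest.length := by simpa using hi
      cases j with
      | zero =>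
        have := key i hi'
        simp only [List.getD_cons_succ, List.getD_cons_zero] at this ⊢
        exact this
      | succ j =>
        have hj' : j < rest.length := by simpa using hj
        simp only [List.getD_cons_succ]
        simp only [encOf]
        cases h : ids.get? row with
        | some w =>
          simp only [List.getD_cons_succ]
          exact ih ids hg i j hi' hj'
        | none =>
          simp only [List.getD_cons_succ]
          exact ih _ (GoodD_insert ids row hg h) i j hi' hj'

-- ---- extent lemmas ----

theorem extS_ge (p : List String) (lim r : Int) : ∀ k, k ≤ extS p lim r k := by
  intro k
  induction hk : (lim - k).toNat using Nat.strong_induction_on generalizing k with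
  | _ n ih =>
    rw [extS]
    split
    · rename_i hcond
      have h2 := ih (lim - (k+1)).toNat (by omega) (k+1) rfl
      omega
    · omega

theorem extS_all (p : List String) (lim r : Int) :
    ∀ k, ∀ j, k ≤ j → j < extS p lim r k →
      j < lim ∧ p.getD (r - 1 - j).toNat "" = p.getD (r + j).toNat "" := by
  intro k
  induction hk : (lim - k).toNat using Nat.strong_induction_on generalizing k with
  | _ n ih =>
    intro j hkj hje
    rw [extS] at hje
    split at hje
    · rename_i hcond
      by_cases hjk : j = k
      · exact hjk ▸ hcond
      · exact ih (lim - (k+1)).toNat (by omega) (k+1) rfl j (by omega) hje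
    · omega

theorem extS_stop (p : List String) (lim r : Int) :
    ∀ k, ¬(extS p lim r k < lim ∧
      p.getD (r - 1 - extS p lim r k).toNat "" = p.getD (r + extS p lim r k).toNat "") := by
  intro k
  induction hk : (lim - k).toNat using Nat.strong_induction_on generalizing k with
  | _ n ih =>
    by_cases hcond : k < lim ∧ p.getD (r - 1 - k).toNat "" = p.getD (r + k).toNat ""
    · have hE : extS p lim r k = extS p lim r (k + 1) := by rw [extS, dif_pos hcond]
      rw [hE]
      exact ih (lim - (k + 1)).toNat (by omega) (k + 1) rfl
    · have hE : extS p lim r k = k := by rw [extS, dif_neg hcond]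
      rw [hE]
      exact hcond

theorem ext_char (p : List String) (lim r : Int) (d : Int) :
    d ≤ extS p lim r 0 ↔
      ∀ j, 0 ≤ j → j < d → (j < lim ∧ p.getD (r - 1 - j).toNat "" = p.getD (r + j).toNat "") := by
  constructor
  · intro hd j h0 hjd
    exact extS_all p lim r 0 j h0 (by omega)
  · intro hall
    by_contra hlt
    push_neg at hlt
    have h0 : (0 : Int) ≤ extS p lim r 0 := extS_ge p lim r 0
    exact extS_stop p lim r 0 (hall (extS p lim r 0) h0 hlt)

-- ---- loop-shape lemmas for A ----

theorem inner_eq (p : List String) (r lim : Int) (hlr : lim ≤ r)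
    (hrn : r + lim ≤ (p.length : Int)) :
    ∀ (d : Int) (st : Int × Int), 0 ≤ d → d - 1 ≤ st.1 →
      aInner p r (PySem.List.pyRange d lim 1) st =
        (if extS p lim r d - 1 > st.1 then (extS p lim r d - 1, r - 1) else st) := by
  intro d st hd hdst
  induction hfu : (lim - d).toNat using Nat.strong_induction_on generalizing d st with
  | _ n ih =>
    by_cases hdl : d < lim
    · rw [PySem.List.pyRange_one_cons (by omega)]
      simp only [aInner]
      have hrw : r - d - 1 = r - 1 - d := by ring
      have hc1 : PySem.List.pyGetD p (r - d - 1) "" = p.getD (r - 1 - d).toNat "" := by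
        rw [hrw, PySem.List.pyGetD_eq_getElem p "" (by omega) (by omega),
          List.getD_eq_getElem p "" (by omega)]
      have hc2 : PySem.List.pyGetD p (r + d) "" = p.getD (r + d).toNat "" := by
        rw [PySem.List.pyGetD_eq_getElem p "" (by omega) (by omega),
          List.getD_eq_getElem p "" (by omega)]
      by_cases hc : p.getD (r - 1 - d).toNat "" = p.getD (r + d).toNat ""
      · rw [if_neg (by rw [hc1, hc2]; exact not_not_intro hc)]
        have hE : extS p lim r d = extS p lim r (d + 1) := by
          rw [extS, dif_pos ⟨hdl, hc⟩]
        have hst' : d ≤ (if d > st.1 then (d, r - 1) else st).1 := by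
          split_ifs with h
          · simp
          · omega
        rw [ih (lim - (d + 1)).toNat (by omega) (d + 1) _ (by omega) (by omega) rfl, hE]
        have hge : d + 1 ≤ extS p lim r (d + 1) := extS_ge p lim r (d + 1)
        by_cases h1 : d > st.1
        · rw [if_pos h1]
          by_cases h2 : extS p lim r (d + 1) - 1 > d
          · rw [if_pos (by simpa using h2), if_pos (by omega)]
          · rw [if_neg (by simpa using h2), if_pos (by omega)]
            have : extS p lim r (d + 1) - 1 = d := by omega
            rw [this]
        · rw [if_neg h1]
      · rw [if_pos (by rw [hc1, hc2]; exact hc)]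
        have hE : extS p lim r d = d := by
          rw [extS, dif_neg (by rw [not_and]; intro _; exact hc)]
        rw [hE, if_neg (by omega)]
    · rw [PySem.List.pyRange_one_eq_nil (by omega)]
      have hE : extS p lim r d = d := by
        rw [extS, dif_neg (by rw [not_and]; intro h; omega)]
      simp only [aInner]
      rw [hE, if_neg (by omega)]

theorem outer_eq (p : List String) :
    ∀ (a : Int) (st : Int × Int), 1 ≤ a → -1 ≤ st.1 →
      (PySem.List.pyRange a (p.length : Int) 1).foldl
        (fun st r => aInner p r (PySem.List.pyRange 0 (min r ((p.length : Int) - r)) 1) st) st =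
      agg st a ((PySem.List.pyRange a (p.length : Int) 1).map
        (fun r => extS p (min r ((p.length : Int) - r)) r 0)) := by
  intro a st ha hst
  induction hfu : ((p.length : Int) - a).toNat using Nat.strong_induction_on generalizing a st with
  | _ n ih =>
    by_cases han : a < (p.length : Int)
    · rw [PySem.List.pyRange_one_cons han]
      simp only [List.foldl_cons, List.map_cons]
      have hinner := inner_eq p a (min a ((p.length : Int) - a))
        (min_le_left _ _) (by omega) 0 st (le_refl 0) (by omega)
      rw [hinner]
      have hge : (0 : Int) ≤ extS p (min a ((p.length : Int) - a)) a 0 := extS_ge p _ a 0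
      have hstep : agg st a
          (extS p (min a ((p.length : Int) - a)) a 0 ::
            (PySem.List.pyRange (a + 1) (p.length : Int)).map
              (fun r => extS p (min r ((p.length : Int) - r)) r 0)) =
          agg (if extS p (min a ((p.length : Int) - a)) a 0 - 1 > st.1
              then (extS p (min a ((p.length : Int) - a)) a 0 - 1, a - 1) else st) (a + 1)
            ((PySem.List.pyRange (a + 1) (p.length : Int)).map
              (fun r => extS p (min r ((p.length : Int) - r)) r 0)) := rfl
      rw [hstep]
      have hnext : -1 ≤ (if extS p (min a ((p.length : Int) - a)) a 0 - 1 > st.1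
          then (extS p (min a ((p.length : Int) - a)) a 0 - 1, a - 1) else st).1 := by
        split_ifs with h
        · simp only
          omega
        · exact hst
      exact ih ((p.length : Int) - (a + 1)).toNat (by omega) (a + 1) _ (by omega) hnext rfl
    · rw [PySem.List.pyRange_one_eq_nil (by omega)]
      rfl

theorem foldl_max_factor (l : List Int) : ∀ (a b : Int),
    l.foldl max (max a b) = max a (l.foldl max b) := by
  induction l with
  | nil => intro a b; simp
  | cons c t ih =>
    intro a b
    simp only [List.foldl_cons]
    rw [max_assoc, ih]

theorem agg_char (t : List Int) : ∀ (k : Int) (st : Int × Int) (r : Int),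
    agg st r (k :: t) =
      (if t.foldl max k - 1 > st.1
       then (t.foldl max k - 1,
             r + (((PySem.List.index? (k :: t) (t.foldl max k)).getD 0 : Nat) : Int) - 1)
       else st) := by
  induction t with
  | nil =>
    intro k st r
    show (if k - 1 > st.1 then (k - 1, r - 1) else st) = _
    simp only [List.foldl_nil]
    rw [PySem.List.index?_cons_self]
    simp only [Option.getD_some, Nat.cast_zero]
    split_ifs with h
    · rw [Prod.mk.injEq]
      constructor
      · rfl
      · ring
    · rfl
  | cons y t' ih =>
    intro k st r
    show agg (if k - 1 > st.1 then (k - 1, r - 1) else st) (r + 1) (y :: t') = _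
    rw [ih y _ (r + 1)]
    have hM : (y :: t').foldl max k = max k (t'.foldl max y) := by
      simp only [List.foldl_cons]
      exact foldl_max_factor t' k y
    rw [hM]
    have hmem : t'.foldl max y ∈ (y :: t') := by
      rcases PySem.List.foldl_max_mem t' y with h | h
      · rw [h]; exact List.mem_cons_self
      · exact List.mem_cons_of_mem _ h
    obtain ⟨it, hit⟩ : ∃ it, PySem.List.index? (y :: t') (t'.foldl max y) = some it := by
      have := (PySem.List.index?_isSome_iff (xs := y :: t') (v := t'.foldl max y)).2 hmem
      exact Option.isSome_iff_exists.1 this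
    by_cases hky : t'.foldl max y ≤ k
    · rw [max_eq_left hky, PySem.List.index?_cons_self]
      simp only [Option.getD_some, Nat.cast_zero, hit]
      by_cases h1 : k - 1 > st.1
      · rw [if_pos h1]
        rw [if_neg (by omega), if_pos h1, Prod.mk.injEq]
        exact ⟨rfl, by ring⟩
      · rw [if_neg h1]
        rw [if_neg (by omega), if_neg h1]
    · rw [not_le] at hky
      rw [max_eq_right (le_of_lt hky),
        PySem.List.index?_cons_of_ne _ (by omega : k ≠ t'.foldl max y), hit]
      simp only [Option.map_some, Option.getD_some]
      by_cases h1 : k - 1 > st.1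
      · rw [if_pos h1]
        rw [if_pos (by omega), if_pos (by omega), Prod.mk.injEq]
        constructor
        · rfl
        · push_cast
          ring
      · rw [if_neg h1]
        by_cases h2 : t'.foldl max y - 1 > st.1
        · rw [if_pos (by omega), if_pos h2, Prod.mk.injEq]
          constructor
          · rfl
          · push_cast
            ring
        · rw [if_neg (by omega), if_neg h2]

theorem A_eq (p : List String) :
    get_reflex p = ((agg (0, 0) 1 (ksOf p)).1, (agg (0, 0) 1 (ksOf p)).2 + 1) := by
  have h := outer_eq p 1 (0, 0) le_rfl (by norm_num)
  have hmap : (PySem.List.pyRange 1 (p.length : Int) 1).map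
      (fun r => extS p (min r ((p.length : Int) - r)) r 0) = ksOf p := rfl
  rw [hmap] at h
  unfold get_reflex
  show ((((PySem.List.pyRange 1 (p.length : Int) 1).foldl
      (fun st start_row =>
        aInner p start_row
          (PySem.List.pyRange 0 (min start_row ((p.length : Int) - start_row)) 1) st)
      (0, 0))).1, _ + 1) = _
  rw [h]

-- ---- B-side lemmas ----

theorem foldl_max_ge (l : List Int) : ∀ (a : Int),
    a ≤ l.foldl max a ∧ ∀ x ∈ l, x ≤ l.foldl max a := by
  intro a
  exact PySem.List.le_foldl_max l a

theorem aliveSpec_zero (p : List String) : aliveSpec p 0 = PySem.List.pyRange 1 (p.length : Int) 1 := by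
  unfold aliveSpec
  apply List.filter_eq_self.2
  intro r _
  simp only [decide_eq_true_eq]
  exact extS_ge p _ r 0

-- one BFS step: filtering the alive set at depth d leaves exactly the lines with extent > d
theorem aliveSpec_step (p : List String) (d : Int) (hd : 0 ≤ d) :
    bKeep (encOf p PySem.Dict.empty) p.length d (aliveSpec p d) = aliveSpec p (d + 1) := by
  unfold bKeep aliveSpec
  rw [List.filter_filter]
  apply List.filter_congr
  intro r hr
  have hmem := (PySem.List.mem_pyRange_one).1 hr
  have hlen := encOf_length p PySem.Dict.empty
  have henc := enc_iff p PySem.Dict.empty GoodD_empty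
  have hiff : (d ≤ extf p r ∧ (d < min r ((p.length : Int) - r) ∧
      PySem.List.pyGetD (encOf p PySem.Dict.empty) (r - 1 - d) 0 =
      PySem.List.pyGetD (encOf p PySem.Dict.empty) (r + d) 0)) ↔ d + 1 ≤ extf p r := by
    constructor
    · rintro ⟨hde, hbound, hmatch⟩
      unfold extf at hde ⊢
      rw [ext_char] at hde ⊢
      intro j h0 hj
      by_cases hjd : j = d
      · subst hjd
        refine ⟨hbound, ?_⟩
        have hi1 : (0 : Int) ≤ r - 1 - j := by omega
        have hi2 : r - 1 - j < ((encOf p PySem.Dict.empty).length : Int) := by rw [hlen]; omega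
        have hi3 : (0 : Int) ≤ r + j := by omega
        have hi4 : r + j < ((encOf p PySem.Dict.empty).length : Int) := by rw [hlen]; omega
        rw [PySem.List.pyGetD_eq_getElem _ 0 hi1 hi2, PySem.List.pyGetD_eq_getElem _ 0 hi3 hi4] at hmatch
        rw [← List.getD_eq_getElem _ 0, ← List.getD_eq_getElem _ 0] at hmatch
        exact (henc (r - 1 - j).toNat (r + j).toNat (by omega) (by omega)).1 hmatch
      · exact hde j h0 (by omega)
    · intro hd1
      unfold extf at hd1 ⊢
      rw [ext_char] at hd1
      have hgood := hd1 d hd (by omega)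
      refine ⟨?_, hgood.1, ?_⟩
      · rw [ext_char]
        intro j h0 hj
        exact hd1 j h0 (by omega)
      · have hbound := hgood.1
        have hi1 : (0 : Int) ≤ r - 1 - d := by omega
        have hi2 : r - 1 - d < ((encOf p PySem.Dict.empty).length : Int) := by rw [hlen]; omega
        have hi3 : (0 : Int) ≤ r + d := by omega
        have hi4 : r + d < ((encOf p PySem.Dict.empty).length : Int) := by rw [hlen]; omega
        rw [PySem.List.pyGetD_eq_getElem _ 0 hi1 hi2, PySem.List.pyGetD_eq_getElem _ 0 hi3 hi4,
          ← List.getD_eq_getElem _ 0, ← List.getD_eq_getElem _ 0]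
        exact (henc (r - 1 - d).toNat (r + d).toNat (by omega) (by omega)).2 hgood.2
  rw [Bool.eq_iff_iff]
  simp only [Bool.and_eq_true, decide_eq_true_eq, beq_iff_eq]
  constructor
  · intro h
    exact hiff.1 (by tauto)
  · intro h
    have := hiff.2 h
    tauto

-- the alive set is empty exactly above the maximal extent
theorem aliveSpec_nil_iff (p : List String) (k : Int) (t : List Int)
    (hks : ksOf p = k :: t) (d : Int) :
    (aliveSpec p d = [] ↔ t.foldl max k < d) := by
  constructor
  · intro hnil
    by_contra hle
    push_neg at hle
    have hmem : t.foldl max k ∈ ksOf p := by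
      rw [hks]
      rcases PySem.List.foldl_max_mem t k with h | h
      · rw [h]; exact List.mem_cons_self
      · exact List.mem_cons_of_mem _ h
    unfold ksOf at hmem
    obtain ⟨r, hr, hrext⟩ := List.mem_map.1 hmem
    have : r ∈ aliveSpec p d := by
      unfold aliveSpec
      rw [List.mem_filter]
      exact ⟨hr, decide_eq_true (by rw [hrext]; exact hle)⟩
    rw [hnil] at this
    exact absurd this (List.not_mem_nil)
  · intro hlt
    unfold aliveSpec
    apply List.filter_eq_nil_iff.2
    intro r hr
    simp only [decide_eq_true_eq, not_le]
    have hmem : extf p r ∈ ksOf p := by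
      unfold ksOf
      exact List.mem_map_of_mem hr
    rw [hks] at hmem
    rcases List.mem_cons.1 hmem with h | h
    · have := (foldl_max_ge t k).1
      omega
    · have := (foldl_max_ge t k).2 _ h
      omega

-- characterisation of the BFS loop from depth d ≥ 1 on
theorem bLoop_char (p : List String) (M : Int)
    (hnil : ∀ d, aliveSpec p d = [] ↔ M < d)
    (hstep : ∀ d, 0 ≤ d → bKeep (encOf p PySem.Dict.empty) p.length d (aliveSpec p d) = aliveSpec p (d + 1)) :
    ∀ d best, 1 ≤ d → best.1 < d →
      bLoop (encOf p PySem.Dict.empty) p.length (aliveSpec p d) d best =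
        if d ≤ M - 1 then (M - 1, (aliveSpec p M).headD 0) else best := by
  intro d best hd hbest
  induction hfu : (M + 1 - d).toNat using Nat.strong_induction_on generalizing d best with
  | _ n ih =>
    rw [bLoop]
    by_cases hdM : M < d
    · rw [if_pos ((hnil d).2 hdM), if_neg (by omega)]
    · push_neg at hdM
      rw [if_neg (by rw [hnil d]; omega), hstep d (by omega)]
      show bLoop (encOf p PySem.Dict.empty) p.length (aliveSpec p (d + 1)) (d + 1)
          (if aliveSpec p (d + 1) ≠ [] ∧ d > best.1
           then (d, (aliveSpec p (d + 1)).headD 0) else best) =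
        if d ≤ M - 1 then (M - 1, (aliveSpec p M).headD 0) else best
      by_cases hdM1 : d + 1 ≤ M
      · have hkeep : aliveSpec p (d + 1) ≠ [] := by rw [ne_eq, hnil (d + 1)]; omega
        rw [if_pos (show aliveSpec p (d + 1) ≠ [] ∧ d > best.1 from ⟨hkeep, by omega⟩)]
        rw [ih (M + 1 - (d + 1)).toNat (by omega) (d + 1) _ (by omega) (by exact lt_add_one d) rfl]
        by_cases hlast : d + 1 ≤ M - 1
        · rw [if_pos hlast, if_pos (show d ≤ M - 1 by omega)]
        · rw [if_neg hlast, if_pos (show d ≤ M - 1 by omega)]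
          have hdm : d = M - 1 := by omega
          rw [hdm, show M - 1 + 1 = M by ring]
      · have hdm : d = M := by omega
        have hkeep : aliveSpec p (d + 1) = [] := (hnil (d + 1)).2 (by omega : M < d + 1)
        rw [hkeep, if_neg (show ¬(([] : List Int) ≠ [] ∧ d > best.1) by simp),
          bLoop, if_pos rfl, if_neg (show ¬ d ≤ M - 1 by omega)]

-- first element of the alive set at maximal depth = first index of the maximum, 1-based
theorem head_filter_eq (M : Int) : ∀ (l : List Int) (f : Int → Int),
    (∀ x ∈ l, f x ≤ M) → ∀ (i : Nat), PySem.List.index? (l.map f) M = some i →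
      (l.filter (fun x => decide (M ≤ f x))).headD 0 = l.getD i 0 := by
  intro l
  induction l with
  | nil => intro f _ i hi; simp [PySem.List.index?_eq_idxOf?] at hi
  | cons a t ih =>
    intro f hub i hi
    simp only [List.map_cons] at hi
    by_cases ha : f a = M
    · rw [ha, PySem.List.index?_cons_self] at hi
      have hi0 : i = 0 := by simpa using hi.symm
      subst hi0
      have hMa : M ≤ f a := le_of_eq ha.symm
      simp [List.filter_cons, hMa]
    · rw [PySem.List.index?_cons_of_ne _ ha] at hi
      obtain ⟨j, hj, hji⟩ : ∃ j, PySem.List.index? (t.map f) M = some j ∧ i = j + 1 := by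
        cases hidx : PySem.List.index? (t.map f) M with
        | none => rw [hidx] at hi; simp at hi
        | some j => rw [hidx] at hi; exact ⟨j, rfl, by simpa using hi.symm⟩
      have hfa : ¬ (M ≤ f a) := by
        have := hub a List.mem_cons_self
        omega
      rw [hji]
      simp only [List.filter_cons, List.getD_cons_succ]
      rw [if_neg (by simpa using hfa)]
      exact ih f (fun x hx => hub x (List.mem_cons_of_mem _ hx)) j hj

theorem index?_some_lt {l : List Int} {v : Int} {i : Nat}
    (h : PySem.List.index? l v = some i) : i < l.length := by
  rw [PySem.List.index?_eq_some_iff] at h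
  obtain ⟨pre, suf, hl, hlen, _⟩ := h
  rw [hl]
  simp [← hlen]

theorem pyRange_getD (b : Int) : ∀ (a : Int) (i : Nat), a + i < b →
    (PySem.List.pyRange a b 1).getD i 0 = a + i := by
  intro a i
  induction i generalizing a with
  | zero =>
    intro hi
    rw [PySem.List.pyRange_one_cons (by omega)]
    simp
  | succ i ih =>
    intro hi
    rw [PySem.List.pyRange_one_cons (by omega)]
    simp only [List.getD_cons_succ]
    rw [ih (a + 1) (by push_cast; push_cast at hi; omega)]
    push_cast
    ring

-- ===== VERDICT (by name: the statement is the Claim_ definition above) =====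
theorem get_reflex_spec : Claim_equal_get_reflex := by
  intro p _
  unfold Spec_get_reflex
  rw [A_eq]
  have hBenc : bEncode p PySem.Dict.empty [] = encOf p PySem.Dict.empty := by
    rw [bEncode_eq]; rfl
  have hlen : (encOf p PySem.Dict.empty).length = p.length := encOf_length p PySem.Dict.empty
  have halt : get_reflex_alt p = bLoop (encOf p PySem.Dict.empty) p.length
      (PySem.List.pyRange 1 (p.length : Int) 1) 0 (0, 1) := by
    show bLoop (bEncode p PySem.Dict.empty []) (bEncode p PySem.Dict.empty []).length
      (PySem.List.pyRange 1 ((bEncode p PySem.Dict.empty []).length : Int) 1) 0 (0, 1) = _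
    rw [hBenc, hlen]
  rw [halt]
  cases hks : ksOf p with
  | nil =>
    have hnil0 : PySem.List.pyRange 1 (p.length : Int) 1 = [] := by
      unfold ksOf at hks
      exact List.map_eq_nil_iff.1 hks
    rw [hnil0, bLoop, if_pos rfl]
    rfl
  | cons k t =>
    have hrange_ne : PySem.List.pyRange 1 (p.length : Int) 1 ≠ [] := by
      intro h
      unfold ksOf at hks
      rw [h] at hks
      simp at hks
    have hM := aliveSpec_nil_iff p k t hks
    have hstep := aliveSpec_step p
    rw [bLoop, if_neg hrange_ne,
      show PySem.List.pyRange 1 (p.length : Int) 1 = aliveSpec p 0 from (aliveSpec_zero p).symm,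
      hstep 0 le_rfl]
    show _ = bLoop (encOf p PySem.Dict.empty) p.length (aliveSpec p 1) 1
      (if aliveSpec p 1 ≠ [] ∧ (0 : Int) > ((0 : Int), (1 : Int)).1
       then ((0 : Int), (aliveSpec p 1).headD 0) else (0, 1))
    rw [if_neg (show ¬(aliveSpec p 1 ≠ [] ∧ (0 : Int) > ((0 : Int), (1 : Int)).1) by simp)]
    rw [bLoop_char p (t.foldl max k) hM hstep 1 (0, 1) le_rfl (by norm_num)]
    rw [agg_char]
    by_cases h2 : t.foldl max k - 1 > 0
    · rw [if_pos h2, if_pos (show (1 : Int) ≤ t.foldl max k - 1 by omega)]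
      have hmemM : t.foldl max k ∈ ksOf p := by
        rw [hks]
        rcases PySem.List.foldl_max_mem t k with h | h
        · rw [h]; exact List.mem_cons_self
        · exact List.mem_cons_of_mem _ h
      obtain ⟨i, hi⟩ : ∃ i, PySem.List.index? (k :: t) (t.foldl max k) = some i := by
        have hm : t.foldl max k ∈ (k :: t) := by rw [← hks]; exact hmemM
        have := (PySem.List.index?_isSome_iff (xs := k :: t) (v := t.foldl max k)).2 hm
        exact Option.isSome_iff_exists.1 this
      have hub : ∀ x ∈ PySem.List.pyRange 1 (p.length : Int) 1, extf p x ≤ t.foldl max k := by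
        intro x hx
        have : extf p x ∈ ksOf p := List.mem_map_of_mem hx
        rw [hks] at this
        rcases List.mem_cons.1 this with h | h
        · have := (foldl_max_ge t k).1; omega
        · exact (foldl_max_ge t k).2 _ h
      have hmap : (PySem.List.pyRange 1 (p.length : Int) 1).map (extf p) = k :: t := by
        rw [← hks]; rfl
      have hhead := head_filter_eq (t.foldl max k) (PySem.List.pyRange 1 (p.length : Int) 1)
        (extf p) hub i (by rw [hmap]; exact hi)
      have hilen : i < (k :: t).length := index?_some_lt hi
      have hilt : (1 : Int) + i < (p.length : Int) := by
        have hl2 : (k :: t).length = ((PySem.List.pyRange 1 (p.length : Int) 1).map (extf p)).length := by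
          rw [hmap]
        rw [List.length_map, PySem.List.length_pyRange_one] at hl2
        omega
      have hgetd := pyRange_getD (p.length : Int) 1 i hilt
      have hhead2 : (aliveSpec p (t.foldl max k)).headD 0 = 1 + (i : Int) := by
        unfold aliveSpec
        rw [hhead, hgetd]
      rw [hhead2, hi]
      simp only [Option.getD_some, Prod.mk.injEq]
      refine ⟨trivial, ?_⟩
      push_cast
      ring
    · rw [if_neg h2, if_neg (show ¬ (1 : Int) ≤ t.foldl max k - 1 by omega)]
      rfl
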